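-- pv_equiv track=rewrite | github.com/brk-a/DSA | 0x01_dsa/56-maximum_sum_among_rotations.py | maximum_sum_among_rotations_pivot
-- ===== SOURCE A (Python) =====
-- def maximum_sum_among_rotations_pivot(nums: list[int]) -> int:
--     if not isinstance(nums, list) or len(nums) == 0:
--         return -1
--
--     n = len(nums)
--     result = 0
--     pivot = find_pivot(nums)
--     diff = n - 1 - pivot
--
--     for i in range(n):
--         result = result + ((i + diff) % n) * nums[i]
--
--     return result
--
-- def find_pivot(nums: list[int]) -> int:
--     n = len(nums)
--     for i in range(n):
--         if nums[i] > nums[(i + 1) % n]: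
--             return i
--     return 0
-- ===== SOURCE B (Python) =====
-- def maximum_sum_among_rotations_pivot(nums: list[int]) -> int:
--     if not isinstance(nums, list) or len(nums) == 0:
--         return -1
--     n = len(nums)
--     pivot = find_pivot(nums)
--     diff = n - 1 - pivot
--     base = 0
--     for i, v in enumerate(nums):
--         base += i * v
--     total = sum(nums)
--     tail = sum(nums[n - diff:])
--     return base + diff * total - n * tail
--
-- def find_pivot(nums: list[int]) -> int:
--     for i in range(len(nums) - 1):
--         if nums[i] > nums[i + 1]:
--             return i
--     if nums[-1] > nums[0]:
--         return len(nums) - 1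
--     return 0
-- ===== Notes on version B (the rewrite author's own statement) =====
-- stated objective: alternative
-- what changed: Replaces the per-index modular weighted loop by a closed form: sum(i*nums[i]) + diff*sum(nums) - n*sum(nums[n-diff:]), with no modular arithmetic in the summation; find_pivot scans adjacent pairs with a separate wrap check instead of indexing with (i+1)%n.
import Mathlib
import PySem

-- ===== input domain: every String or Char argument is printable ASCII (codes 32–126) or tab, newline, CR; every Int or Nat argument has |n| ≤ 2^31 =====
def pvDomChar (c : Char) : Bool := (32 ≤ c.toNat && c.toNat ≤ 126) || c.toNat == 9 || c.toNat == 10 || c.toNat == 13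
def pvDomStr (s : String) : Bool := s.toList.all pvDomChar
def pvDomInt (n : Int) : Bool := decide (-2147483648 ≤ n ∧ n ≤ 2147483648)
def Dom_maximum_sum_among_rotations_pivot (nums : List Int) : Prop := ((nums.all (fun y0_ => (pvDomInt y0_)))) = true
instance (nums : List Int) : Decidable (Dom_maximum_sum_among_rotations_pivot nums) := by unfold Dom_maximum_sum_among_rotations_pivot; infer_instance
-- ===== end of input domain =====

-- B replaces the per-index modular weighted loop by the closed form
-- base + diff*total - n*tail (no modular arithmetic in the summation); equal return values proved below.
-- ===== PORT A =====
-- find_pivot: the for-loop with early return over range(n); every index is in range, so xs[i] is pyGetD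
def findPivotGo (nums : List Int) (n : Int) : List Int → Int
  | [] => 0
  | i :: rest =>
      if PySem.List.pyGetD nums i 0 > PySem.List.pyGetD nums (PySem.Int.mod (i + 1) n) 0 then i
      else findPivotGo nums n rest

def find_pivot (nums : List Int) : Int :=
  findPivotGo nums (nums.length : Int) (PySem.List.pyRange 0 (nums.length : Int) 1)

def maximum_sum_among_rotations_pivot (nums : List Int) : Int :=
  if nums.length = 0 then -1
  else
    let n : Int := (nums.length : Int)
    let pivot := find_pivot nums
    let diff := n - 1 - pivot
    (PySem.List.pyRange 0 n 1).foldl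
      (fun result i => result + PySem.Int.mod (i + diff) n * PySem.List.pyGetD nums i 0) 0

-- ===== PORT B =====
-- B's find_pivot: scan adjacent pairs over range(n-1) (early return = Option), then a separate wrap check
def findPivotAltGo (nums : List Int) : List Int → Option Int
  | [] => none
  | i :: rest =>
      if PySem.List.pyGetD nums i 0 > PySem.List.pyGetD nums (i + 1) 0 then some i
      else findPivotAltGo nums rest

def find_pivot_alt (nums : List Int) : Int :=
  match findPivotAltGo nums (PySem.List.pyRange 0 ((nums.length : Int) - 1) 1) with
  | some i => i
  | none =>
      if PySem.List.pyGetD nums (-1) 0 > PySem.List.pyGetD nums 0 0 then (nums.length : Int) - 1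
      else 0

def maximum_sum_among_rotations_pivot_alt (nums : List Int) : Int :=
  if nums.length = 0 then -1
  else
    let n : Int := (nums.length : Int)
    let pivot := find_pivot_alt nums
    let diff := n - 1 - pivot
    let base := (PySem.List.enumerate nums 0).foldl (fun b p => b + p.1 * p.2) 0
    let total := nums.sum
    let tail := (PySem.List.slice nums (some (n - diff)) none).sum
    base + diff * total - n * tail

-- ===== PRECONDITION & SPEC =====
def Spec_maximum_sum_among_rotations_pivot (nums : List Int) (out : Int) : Prop := out = maximum_sum_among_rotations_pivot_alt nums
instance (nums : List Int) (out : Int) : Decidable (Spec_maximum_sum_among_rotations_pivot nums out) := by unfold Spec_maximum_sum_among_rotations_pivot; infer_instance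

-- ===== CLAIM (what is proved, stated in full; the proofs are below) =====
def Claim_equal_maximum_sum_among_rotations_pivot : Prop := ∀ (nums : List Int), Dom_maximum_sum_among_rotations_pivot nums → Spec_maximum_sum_among_rotations_pivot nums (maximum_sum_among_rotations_pivot nums)

-- ===== LEMMAS AND PROOFS =====

theorem sum_map_sub_int {α : Type} (xs : List α) (f g : α → ℤ) :
    (xs.map (fun x => f x - g x)).sum = (xs.map f).sum - (xs.map g).sum := by
  induction xs with
  | nil => simp
  | cons x xs ih => simp [ih]; ring

theorem sum_getD (l : List Int) :
    l.sum = ((List.range l.length).map (fun k : Nat => l.getD k 0)).sum := by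
  induction l with
  | nil => simp
  | cons x l ih =>
    rw [List.sum_cons, ih, List.length_cons, List.sum_range_succ']
    simp

theorem enum_foldl (l : List Int) :
    ∀ (c s : ℤ), (PySem.List.enumerate l s).foldl (fun b p => b + p.1 * p.2) c
      = c + ((List.range l.length).map (fun k : Nat => (s + (k : ℤ)) * l.getD k 0)).sum := by
  induction l with
  | nil => intro c s; simp [PySem.List.enumerate]
  | cons x l ih =>
    intro c s
    rw [PySem.List.enumerate_cons, List.foldl_cons, ih, List.length_cons, List.sum_range_succ']
    simp only [List.getD_cons_succ, List.getD_cons_zero, Nat.cast_zero]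
    have hmap : (List.range l.length).map (fun k : Nat => (s + 1 + (k : ℤ)) * l.getD k 0)
        = (List.range l.length).map (fun k : Nat => (s + ((k : ℤ) + 1)) * l.getD k 0) := by
      apply List.map_congr_left
      intro k _
      ring
    rw [hmap]
    push_cast
    ring

theorem pivotGo_zero_or_mem (nums : List Int) (n : Int) :
    ∀ (l : List Int), findPivotGo nums n l = 0 ∨ findPivotGo nums n l ∈ l := by
  intro l
  induction l with
  | nil => left; rfl
  | cons i rest ih =>
    rw [findPivotGo]
    split_ifs
    · right; exact List.mem_cons_self ..
    · rcases ih with h | h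
      · left; exact h
      · right; exact List.mem_cons_of_mem _ h

theorem pivot_bounds (nums : List Int) (h : nums ≠ []) :
    0 ≤ find_pivot nums ∧ find_pivot nums < (nums.length : Int) := by
  have hlen : 0 < nums.length := List.length_pos_iff.mpr h
  unfold find_pivot
  rcases pivotGo_zero_or_mem nums (nums.length : Int) (PySem.List.pyRange 0 (nums.length : Int) 1) with
    h0 | hmem
  · rw [h0]; exact ⟨le_refl 0, by exact_mod_cast hlen⟩
  · exact PySem.List.mem_pyRange_one.mp hmem

theorem go_bridge (nums : List Int) (h : nums ≠ []) :
    ∀ (l : List Int), (∀ i ∈ l, 0 ≤ i ∧ i + 1 < (nums.length : Int)) →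
    findPivotGo nums (nums.length : Int) (l ++ [(nums.length : Int) - 1]) =
      (match findPivotAltGo nums l with
       | some i => i
       | none =>
           if PySem.List.pyGetD nums (-1) 0 > PySem.List.pyGetD nums 0 0 then (nums.length : Int) - 1
           else 0) := by
  have hlen : 0 < nums.length := List.length_pos_iff.mpr h
  have hn : (0 : ℤ) < (nums.length : Int) := by exact_mod_cast hlen
  intro l hl
  induction l with
  | nil =>
    simp only [List.nil_append, findPivotAltGo]
    rw [findPivotGo]
    have h1 : (nums.length : Int) - 1 + 1 = (nums.length : Int) := by ring
    have h2 : PySem.Int.mod ((nums.length : Int)) (nums.length : Int) = 0 := by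
      rw [PySem.Int.mod_eq_emod_of_pos hn, Int.emod_self]
    have h3 : PySem.List.pyGetD nums ((nums.length : Int) - 1) 0 = PySem.List.pyGetD nums (-1) 0 := by
      rw [PySem.List.pyGetD_neg_one nums 0 h, List.getLast_eq_getElem,
        PySem.List.pyGetD_eq_getElem nums 0 (by omega) (by omega)]
      congr 1
      omega
    rw [h1, h2, h3, findPivotGo]
  | cons i rest ih =>
    have hi := hl i (List.mem_cons_self ..)
    have hrest : ∀ j ∈ rest, 0 ≤ j ∧ j + 1 < (nums.length : Int) :=
      fun j hj => hl j (List.mem_cons_of_mem _ hj)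
    rw [List.cons_append, findPivotGo, findPivotAltGo]
    have hmod : PySem.Int.mod (i + 1) (nums.length : Int) = i + 1 := by
      rw [PySem.Int.mod_eq_emod_of_pos hn, Int.emod_eq_of_lt (by omega) (by omega)]
    rw [hmod]
    by_cases hc : PySem.List.pyGetD nums i 0 > PySem.List.pyGetD nums (i + 1) 0
    · rw [if_pos hc, if_pos hc]
    · rw [if_neg hc, if_neg hc]
      exact ih hrest

theorem pivot_eq (nums : List Int) (h : nums ≠ []) :
    find_pivot nums = find_pivot_alt nums := by
  have hlen : 0 < nums.length := List.length_pos_iff.mpr h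
  have hsplit : PySem.List.pyRange 0 (nums.length : Int) 1 =
      PySem.List.pyRange 0 ((nums.length : Int) - 1) 1 ++ [(nums.length : Int) - 1] := by
    have hstep := PySem.List.pyRange_one_succ_right (a := 0) (b := (nums.length : Int) - 1) (by omega)
    have h1 : (nums.length : Int) - 1 + 1 = (nums.length : Int) := by ring
    rw [h1] at hstep
    exact hstep
  unfold find_pivot find_pivot_alt
  rw [hsplit]
  exact go_bridge nums h _ (fun i hi => by
    have := PySem.List.mem_pyRange_one.mp hi
    omega)

theorem sum_ite_drop (l : List Int) (t : Nat) (ht : t ≤ l.length) (c : ℤ) :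
    ((List.range l.length).map (fun k : Nat => if t ≤ k then c * l.getD k 0 else 0)).sum
      = c * (l.drop t).sum := by
  have hsplit : l.length = t + (l.length - t) := by omega
  rw [hsplit, List.range_add, List.map_append, List.sum_append]
  have hfst : ((List.range t).map (fun k : Nat => if t ≤ k then c * l.getD k 0 else 0)).sum = 0 := by
    rw [List.map_congr_left (g := fun _ => (0 : ℤ))
      (fun k hk => by simp only [List.mem_range] at hk; simp [Nat.not_le.mpr hk])]
    simp
  rw [hfst, zero_add, List.map_map]
  have hsnd : ((List.range (l.length - t)).map
        ((fun k : Nat => if t ≤ k then c * l.getD k 0 else 0) ∘ (fun x => t + x)))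
      = (List.range (l.length - t)).map (fun x : Nat => c * (l.drop t).getD x 0) := by
    apply List.map_congr_left
    intro x _
    simp
  rw [hsnd, List.sum_map_mul_left, ← List.length_drop, ← sum_getD]

theorem core_sum (l : List Int) (diff : Int) (hd : 0 ≤ diff) (hdm : diff < (l.length : Int)) :
    ((List.range l.length).map
        (fun k : Nat => PySem.Int.mod ((k : ℤ) + diff) (l.length : Int) * l.getD k 0)).sum
      = ((List.range l.length).map (fun k : Nat => (k : ℤ) * l.getD k 0)).sum
        + diff * l.sum
        - (l.length : Int) * (l.drop (l.length - diff.toNat)).sum := by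
  have hn : (0 : ℤ) < (l.length : Int) := by omega
  have hdt : ((diff.toNat : ℤ)) = diff := Int.toNat_of_nonneg hd
  have hpt : ((List.range l.length).map
        (fun k : Nat => PySem.Int.mod ((k : ℤ) + diff) (l.length : Int) * l.getD k 0))
      = (List.range l.length).map
        (fun k : Nat => ((k : ℤ) * l.getD k 0 + diff * l.getD k 0)
          - (if l.length - diff.toNat ≤ k then (l.length : Int) * l.getD k 0 else 0)) := by
    apply List.map_congr_left
    intro k hk
    simp only [List.mem_range] at hk
    have hkt : ((l.length - diff.toNat : Nat) : ℤ) = (l.length : Int) - diff := by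
      omega
    have hmod : PySem.Int.mod ((k : ℤ) + diff) (l.length : Int)
        = (k : ℤ) + diff - (if l.length - diff.toNat ≤ k then (l.length : Int) else 0) := by
      rw [PySem.Int.mod_eq_emod_of_pos hn]
      by_cases hc : l.length - diff.toNat ≤ k
      · have hck : (l.length : Int) - diff ≤ (k : ℤ) := by
          rw [← hkt]; exact_mod_cast hc
        rw [if_pos hc, ← Int.sub_emod_right, Int.emod_eq_of_lt (by omega) (by omega)]
      · have hck : ((k : ℤ)) < (l.length : Int) - diff := by
          rw [← hkt]; exact_mod_cast Nat.lt_of_not_le hc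
        rw [if_neg hc, sub_zero, Int.emod_eq_of_lt (by omega) (by omega)]
    rw [hmod]
    by_cases hc : l.length - diff.toNat ≤ k
    · simp only [if_pos hc]; ring
    · simp only [if_neg hc]; ring
  rw [hpt, sum_map_sub_int, PySem.List.sum_map_add_int, List.sum_map_mul_left,
    sum_ite_drop l (l.length - diff.toNat) (by omega) ((l.length : Int)), ← sum_getD]

theorem a_fold_sum (nums : List Int) (diff : Int) :
    (PySem.List.pyRange 0 (nums.length : Int) 1).foldl
        (fun result i => result + PySem.Int.mod (i + diff) (nums.length : Int) * PySem.List.pyGetD nums i 0) 0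
      = ((List.range nums.length).map
          (fun k : Nat => PySem.Int.mod ((k : ℤ) + diff) (nums.length : Int) * nums.getD k 0)).sum := by
  rw [PySem.List.foldl_add, PySem.List.pyRange_one, List.map_map]
  simp only [Int.sub_zero, Int.toNat_natCast, zero_add]
  refine congrArg List.sum (List.map_congr_left ?_)
  intro k _
  simp [List.getD]

-- ===== VERDICT (by name: the statement is the Claim_ definition above) =====
theorem maximum_sum_among_rotations_pivot_spec : Claim_equal_maximum_sum_among_rotations_pivot := by
  intro nums _
  unfold Spec_maximum_sum_among_rotations_pivot
  unfold maximum_sum_among_rotations_pivot maximum_sum_among_rotations_pivot_alt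
  by_cases h0 : nums.length = 0
  · simp [h0]
  · have h : nums ≠ [] := fun he => h0 (by simp [he])
    simp only [if_neg h0]
    rw [← pivot_eq nums h]
    have hb := pivot_bounds nums h
    set pivot := find_pivot nums with hp
    set diff : Int := (nums.length : Int) - 1 - pivot with hdiff
    have hd : 0 ≤ diff := by omega
    have hdm : diff < (nums.length : Int) := by omega
    rw [a_fold_sum nums diff, core_sum nums diff hd hdm, enum_foldl nums 0 0,
      PySem.List.slice_from nums (a := (nums.length : Int) - diff) (by omega)]
    have htn : ((nums.length : Int) - diff).toNat = nums.length - diff.toNat := by omega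
    rw [htn]
    simp
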